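-- pv_equiv track=rewrite | github.com/rmcd-mscb/nhf-spatial-targets | src/nhf_spatial_targets/credentials.py | _remove_earthdata_blocks
-- ===== SOURCE A (Python) =====
-- def _remove_earthdata_blocks(lines: list[str]) -> list[str]:
--     """Return lines with all 'machine urs.earthdata.nasa.gov' blocks removed.
--
--     Preserves all other content verbatim, including macdef bodies, default
--     blocks, comments, and blank lines.
--
--     A ``machine urs.earthdata.nasa.gov`` block starts at the line whose
--     first non-whitespace token is ``machine`` followed by
--     ``urs.earthdata.nasa.gov``.  The block extends through subsequent
--     continuation lines (lines that do not start a new top-level keyword)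
--     until one of the following is encountered:
--
--     - Another ``machine <name>`` line
--     - A ``default`` line
--     - A ``macdef <name>`` line (the macdef body through the next blank line
--       is **not** considered part of the earthdata block)
--     - End of file
--     """
--     _EARTHDATA_HOST = "urs.earthdata.nasa.gov"
--
--     result: list[str] = []
--     skip = False
--
--     for line in lines:
--         stripped = line.strip()
--         tokens = stripped.split()
--
--         # Detect top-level keyword lines
--         is_machine = len(tokens) >= 2 and tokens[0] == "machine"
--         is_default = len(tokens) >= 1 and tokens[0] == "default"
--         is_macdef = len(tokens) >= 2 and tokens[0] == "macdef"
--
--         if is_machine: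
--             if tokens[1] == _EARTHDATA_HOST:
--                 # Start of an earthdata block — skip it
--                 skip = True
--             else:
--                 # A different machine block — keep it
--                 skip = False
--                 result.append(line)
--         elif is_default or is_macdef:
--             # Top-level default/macdef — always keep; end any earthdata skip
--             skip = False
--             result.append(line)
--         else:
--             if not skip:
--                 result.append(line)
--
--     return result
-- ===== SOURCE B (Python) =====
-- def _remove_earthdata_blocks(lines: list[str]) -> list[str]:
--     """Group the netrc lines into blocks, then keep every block except the
--     'machine urs.earthdata.nasa.gov' ones."""
--     _EARTHDATA_HOST = "urs.earthdata.nasa.gov"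
--
--     def header_tokens(line):
--         tokens = line.strip().split()
--         if len(tokens) >= 2 and tokens[0] == "machine":
--             return tokens
--         if len(tokens) >= 1 and tokens[0] == "default":
--             return tokens
--         if len(tokens) >= 2 and tokens[0] == "macdef":
--             return tokens
--         return None
--
--     # blocks: list of (header tokens or None, segment lines); the first block
--     # (header None) is the preamble before any top-level header line.
--     done = []
--     cur = (None, [])
--     for line in lines:
--         tokens = header_tokens(line)
--         if tokens is not None:
--             done.append(cur)
--             cur = (tokens, [line])
--         else:
--             cur[1].append(line)
--     blocks = done + [cur]
--
--     out = []
--     for hdr, seg in blocks: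
--         if hdr is not None and hdr[0] == "machine" and hdr[1] == _EARTHDATA_HOST:
--             continue
--         out.extend(seg)
--     return out
-- ===== Notes on version B (the rewrite author's own statement) =====
-- stated objective: alternative
-- what changed: Replaces the stateful skip-flag single pass with a group-then-filter decomposition: the lines are first split into a preamble plus header-led blocks, then the result is the concatenation of every block whose header is not 'machine urs.earthdata.nasa.gov'.
import Mathlib
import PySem

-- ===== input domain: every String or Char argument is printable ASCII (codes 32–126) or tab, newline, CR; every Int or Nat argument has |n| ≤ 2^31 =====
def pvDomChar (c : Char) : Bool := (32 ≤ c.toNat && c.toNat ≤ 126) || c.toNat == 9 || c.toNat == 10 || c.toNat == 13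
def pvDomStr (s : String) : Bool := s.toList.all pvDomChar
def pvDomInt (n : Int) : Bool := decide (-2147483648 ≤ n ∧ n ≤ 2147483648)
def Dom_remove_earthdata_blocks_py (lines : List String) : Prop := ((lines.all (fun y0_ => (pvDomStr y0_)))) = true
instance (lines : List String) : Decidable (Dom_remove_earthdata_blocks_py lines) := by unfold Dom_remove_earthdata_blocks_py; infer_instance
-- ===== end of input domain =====

-- B replaces A's stateful skip-flag pass by grouping the lines into header-led blocks and
-- filtering out the earthdata blocks (objective: alternative decomposition, same cost).

-- ===== PORT A =====
def remove_earthdata_blocks_py (lines : List String) : List String :=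
  (lines.foldl (fun (s : List String × Bool) line =>
    let stripped := PySem.Str.strip line
    let tokens := PySem.Str.split₀ stripped
    let is_machine := decide (2 ≤ tokens.length) && (tokens.getD 0 "" == "machine")
    let is_default := decide (1 ≤ tokens.length) && (tokens.getD 0 "" == "default")
    let is_macdef := decide (2 ≤ tokens.length) && (tokens.getD 0 "" == "macdef")
    if is_machine then
      if tokens.getD 1 "" == "urs.earthdata.nasa.gov" then (s.1, true)
      else (s.1 ++ [line], false)
    else if is_default || is_macdef then (s.1 ++ [line], false)
    else if !s.2 then (s.1 ++ [line], s.2) else (s.1, s.2)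
  ) (([] : List String), false)).1

-- ===== PORT B =====
-- Source B's header_tokens helper: Some tokens iff the line starts a top-level block
def pvHeaderTokens (line : String) : Option (List String) :=
  let tokens := PySem.Str.split₀ (PySem.Str.strip line)
  if decide (2 ≤ tokens.length) && (tokens.getD 0 "" == "machine") then some tokens
  else if decide (1 ≤ tokens.length) && (tokens.getD 0 "" == "default") then some tokens
  else if decide (2 ≤ tokens.length) && (tokens.getD 0 "" == "macdef") then some tokens
  else none

-- the filter test of Source B's second loop: is this block an earthdata block?
def pvIsEarth (b : Option (List String) × List String) : Bool :=
  match b.1 with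
  | some toks => (toks.getD 0 "" == "machine") && (toks.getD 1 "" == "urs.earthdata.nasa.gov")
  | none => false

def remove_earthdata_blocks_py_alt (lines : List String) : List String :=
  -- first loop of Source B: group lines into (header?, segment) blocks
  let st := lines.foldl
    (fun (s : List (Option (List String) × List String) × (Option (List String) × List String)) line =>
      match pvHeaderTokens line with
      | some toks => (s.1 ++ [s.2], (some toks, [line]))
      | none => (s.1, (s.2.1, s.2.2 ++ [line])))
    (([], (none, [])))
  let blocks := st.1 ++ [st.2]
  -- second loop of Source B: keep every non-earthdata block
  blocks.foldl (fun out b => if pvIsEarth b then out else out ++ b.2) []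

-- ===== PRECONDITION & SPEC =====
def Spec_remove_earthdata_blocks_py (lines : List String) (out : List String) : Prop := out = remove_earthdata_blocks_py_alt lines
instance (lines : List String) (out : List String) : Decidable (Spec_remove_earthdata_blocks_py lines out) := by unfold Spec_remove_earthdata_blocks_py; infer_instance

-- ===== CLAIM (what is proved, stated in full; the proofs are below) =====
def Claim_equal_remove_earthdata_blocks_py : Prop := ∀ (lines : List String), Dom_remove_earthdata_blocks_py lines → Spec_remove_earthdata_blocks_py lines (remove_earthdata_blocks_py lines)

-- ===== LEMMAS AND PROOFS =====
-- proof-only names for the two fold bodies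
def pvAStep (s : List String × Bool) (line : String) : List String × Bool :=
  let stripped := PySem.Str.strip line
  let tokens := PySem.Str.split₀ stripped
  let is_machine := decide (2 ≤ tokens.length) && (tokens.getD 0 "" == "machine")
  let is_default := decide (1 ≤ tokens.length) && (tokens.getD 0 "" == "default")
  let is_macdef := decide (2 ≤ tokens.length) && (tokens.getD 0 "" == "macdef")
  if is_machine then
    if tokens.getD 1 "" == "urs.earthdata.nasa.gov" then (s.1, true)
    else (s.1 ++ [line], false)
  else if is_default || is_macdef then (s.1 ++ [line], false)
  else if !s.2 then (s.1 ++ [line], s.2) else (s.1, s.2)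

def pvBStep (s : List (Option (List String) × List String) × (Option (List String) × List String))
    (line : String) : List (Option (List String) × List String) × (Option (List String) × List String) :=
  match pvHeaderTokens line with
  | some toks => (s.1 ++ [s.2], (some toks, [line]))
  | none => (s.1, (s.2.1, s.2.2 ++ [line]))

def pvFlatKeep (bs : List (Option (List String) × List String)) : List String :=
  (bs.filter (fun b => !pvIsEarth b)).flatMap (fun b => b.2)

theorem pvFlatKeep_append (xs ys : List (Option (List String) × List String)) :
    pvFlatKeep (xs ++ ys) = pvFlatKeep xs ++ pvFlatKeep ys := by
  simp [pvFlatKeep]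

theorem pvOutFold (bs : List (Option (List String) × List String)) (acc : List String) :
    bs.foldl (fun out b => if pvIsEarth b then out else out ++ b.2) acc = acc ++ pvFlatKeep bs := by
  induction bs generalizing acc with
  | nil => simp [pvFlatKeep]
  | cons b bs ih =>
    simp only [List.foldl_cons]
    cases h : pvIsEarth b <;> simp [h, ih, pvFlatKeep]

@[simp] theorem pvIsEarth_some (t : List String) (ls : List String) :
    pvIsEarth (some t, ls) = ((t.getD 0 "" == "machine") && (t.getD 1 "" == "urs.earthdata.nasa.gov")) := rfl

@[simp] theorem pvIsEarth_none (ls : List String) : pvIsEarth (none, ls) = false := rfl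

theorem pvIsEarth_snd (cur : Option (List String) × List String) (x : List String) :
    pvIsEarth (cur.1, x) = pvIsEarth cur := rfl

theorem pvFlatKeep_single (b : Option (List String) × List String) :
    pvFlatKeep [b] = if pvIsEarth b then [] else b.2 := by
  cases h : pvIsEarth b <;> simp [pvFlatKeep, h]

theorem pvMain (lines : List String) : ∀ (res : List String) (skip : Bool)
    (done : List (Option (List String) × List String)) (cur : Option (List String) × List String),
    res = pvFlatKeep done ++ (if pvIsEarth cur then [] else cur.2) →
    skip = pvIsEarth cur →
    (lines.foldl pvAStep (res, skip)).1 =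
      pvFlatKeep ((lines.foldl pvBStep (done, cur)).1 ++ [(lines.foldl pvBStep (done, cur)).2]) := by
  induction lines with
  | nil =>
    intro res skip done cur h1 h2
    simp only [List.foldl_nil, pvFlatKeep_append, pvFlatKeep_single, h1]
  | cons line rest ih =>
    intro res skip done cur h1 h2
    simp only [List.foldl_cons]
    simp only [pvAStep, pvBStep, pvHeaderTokens]
    cases h1m : decide (2 ≤ (PySem.Str.split₀ (PySem.Str.strip line)).length)
        && ((PySem.Str.split₀ (PySem.Str.strip line)).getD 0 "" == "machine") with
    | true =>
      have hm : ((PySem.Str.split₀ (PySem.Str.strip line)).getD 0 "" == "machine") = true :=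
        (Bool.and_eq_true_iff.mp h1m).2
      simp only [if_true]
      have hm' : (PySem.Str.split₀ (PySem.Str.strip line))[0]?.getD "" = "machine" := by
        simpa [List.getD] using hm
      cases he : (PySem.Str.split₀ (PySem.Str.strip line)).getD 1 "" == "urs.earthdata.nasa.gov" with
      | true =>
        have he' : (PySem.Str.split₀ (PySem.Str.strip line))[1]?.getD "" = "urs.earthdata.nasa.gov" := by
          simpa [List.getD] using he
        simp only [if_true]
        apply ih
        · simp [pvFlatKeep_append, pvFlatKeep_single, hm', he', h1]
        · simp [hm', he']
      | false =>
        have he' : ¬ (PySem.Str.split₀ (PySem.Str.strip line))[1]?.getD "" = "urs.earthdata.nasa.gov" := by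
          simpa [List.getD] using he
        simp only [Bool.false_eq_true, if_false]
        apply ih
        · simp [pvFlatKeep_append, pvFlatKeep_single, he', h1]
        · simp [he']
    | false =>
      simp only [Bool.false_eq_true, if_false]
      cases h2d : (decide (1 ≤ (PySem.Str.split₀ (PySem.Str.strip line)).length)
          && ((PySem.Str.split₀ (PySem.Str.strip line)).getD 0 "" == "default"))
          || (decide (2 ≤ (PySem.Str.split₀ (PySem.Str.strip line)).length)
          && ((PySem.Str.split₀ (PySem.Str.strip line)).getD 0 "" == "macdef")) with
      | true =>
        -- header line: default or macdef; its first token is not "machine"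
        have hm : ((PySem.Str.split₀ (PySem.Str.strip line)).getD 0 "" == "machine") = false := by
          rcases Bool.or_eq_true_iff.mp h2d with h | h
          · have h' := (Bool.and_eq_true_iff.mp h).2
            simp [List.getD] at h' ⊢
            simp [h']
          · have h' := (Bool.and_eq_true_iff.mp h).2
            simp [List.getD] at h' ⊢
            simp [h']
        have hm' : ¬ (PySem.Str.split₀ (PySem.Str.strip line))[0]?.getD "" = "machine" := by
          simpa [List.getD] using hm
        cases hdef : decide (1 ≤ (PySem.Str.split₀ (PySem.Str.strip line)).length)
            && ((PySem.Str.split₀ (PySem.Str.strip line)).getD 0 "" == "default") with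
        | true =>
          simp only [if_true]
          apply ih
          · simp [pvFlatKeep_append, pvFlatKeep_single, hm', h1]
          · simp [hm']
        | false =>
          have hmac : (decide (2 ≤ (PySem.Str.split₀ (PySem.Str.strip line)).length)
              && ((PySem.Str.split₀ (PySem.Str.strip line)).getD 0 "" == "macdef")) = true := by
            rcases Bool.or_eq_true_iff.mp h2d with h | h
            · rw [h] at hdef; exact absurd hdef (by simp)
            · exact h
          simp only [hmac, Bool.false_eq_true, if_false, if_true]
          apply ih
          · simp [pvFlatKeep_append, pvFlatKeep_single, hm', h1]
          · simp [hm']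
      | false =>
        have hdef : (decide (1 ≤ (PySem.Str.split₀ (PySem.Str.strip line)).length)
            && ((PySem.Str.split₀ (PySem.Str.strip line)).getD 0 "" == "default")) = false :=
          (Bool.or_eq_false_iff.mp h2d).1
        have hmac : (decide (2 ≤ (PySem.Str.split₀ (PySem.Str.strip line)).length)
            && ((PySem.Str.split₀ (PySem.Str.strip line)).getD 0 "" == "macdef")) = false :=
          (Bool.or_eq_false_iff.mp h2d).2
        simp only [hdef, hmac, Bool.false_eq_true, if_false]
        cases hsk : skip with
        | true =>
          have hce : pvIsEarth cur = true := hsk ▸ h2.symm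
          simp only [Bool.not_true, Bool.false_eq_true, if_false]
          apply ih
          · rw [pvIsEarth_snd, hce]; simp only [if_true]
            rw [h1, hce]; simp
          · rw [pvIsEarth_snd, hce]
        | false =>
          have hce : pvIsEarth cur = false := hsk ▸ h2.symm
          simp only [Bool.not_false, if_true]
          apply ih
          · rw [pvIsEarth_snd, hce]; simp only [Bool.false_eq_true, if_false]
            rw [h1, hce]; simp
          · rw [pvIsEarth_snd, hce]

-- ===== VERDICT (by name: the statement is the Claim_ definition above) =====
set_option maxHeartbeats 2000000 in
theorem remove_earthdata_blocks_py_spec : Claim_equal_remove_earthdata_blocks_py := by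
  intro lines _
  unfold Spec_remove_earthdata_blocks_py
  have hstepA : (fun (s : List String × Bool) line =>
      let stripped := PySem.Str.strip line
      let tokens := PySem.Str.split₀ stripped
      let is_machine := decide (2 ≤ tokens.length) && (tokens.getD 0 "" == "machine")
      let is_default := decide (1 ≤ tokens.length) && (tokens.getD 0 "" == "default")
      let is_macdef := decide (2 ≤ tokens.length) && (tokens.getD 0 "" == "macdef")
      if is_machine then
        if tokens.getD 1 "" == "urs.earthdata.nasa.gov" then (s.1, true)
        else (s.1 ++ [line], false)
      else if is_default || is_macdef then (s.1 ++ [line], false)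
      else if !s.2 then (s.1 ++ [line], s.2) else (s.1, s.2)) = pvAStep := rfl
  have hstepB : (fun (s : List (Option (List String) × List String) × (Option (List String) × List String)) line =>
      match pvHeaderTokens line with
      | some toks => (s.1 ++ [s.2], (some toks, [line]))
      | none => (s.1, (s.2.1, s.2.2 ++ [line]))) = pvBStep := rfl
  have ha : remove_earthdata_blocks_py lines = (lines.foldl pvAStep ([], false)).1 := by
    simp only [remove_earthdata_blocks_py, hstepA]
  have hb : remove_earthdata_blocks_py_alt lines =
      pvFlatKeep ((lines.foldl pvBStep ([], (none, []))).1 ++ [(lines.foldl pvBStep ([], (none, []))).2]) := by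
    simp only [remove_earthdata_blocks_py_alt, hstepB]
    rw [pvOutFold]
    simp
  rw [ha, hb]
  exact pvMain lines [] false [] (none, []) (by simp [pvFlatKeep]) (by simp)
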